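-- pv_equiv track=rewrite | github.com/matteozullo/Miscellanea | covid19-simulation.py | subset_population
-- ===== SOURCE A (Python) =====
-- DAYS_INCUB = 2 + 1  # days of incubation (add 1 b/c counter starts at 1)
--
-- def subset_population(pop: dict):
--   """
--   Returns lists of indexes for the different health status.
--   """
--
--   idx_healthy, idx_incubation, idx_recovered, idx_dead, idx_sick = [], [], [], [], []
--
--   # extract features
--   ids = [i for i in range(len(pop['id']))]
--   statuses = [s for s in pop['sick']]
--   counters = [c for c in pop['sick_counter']]
--
--   # subset
--   for idx, status, counter in zip(ids, statuses, counters):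
--     if (status == 0): idx_healthy.append(idx)
--     elif (status == 1) and (counter <=DAYS_INCUB): idx_incubation.append(idx)
--     elif (status == 2): idx_recovered.append(idx)
--     elif (status == 3): idx_dead.append(idx)
--     else: idx_sick.append(idx)
--
--   return idx_healthy, idx_incubation, idx_recovered, idx_dead, idx_sick
-- ===== SOURCE B (Python) =====
-- DAYS_INCUB = 2 + 1  # days of incubation (add 1 b/c counter starts at 1)
--
-- def subset_population(pop: dict):
--   """
--   Returns lists of indexes for the different health status, one filtered
--   pass per bucket over the same zipped view of the population.
--   """
--   triples = list(zip(range(len(pop['id'])), pop['sick'], pop['sick_counter']))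
--   idx_healthy = [i for i, s, c in triples if s == 0]
--   idx_incubation = [i for i, s, c in triples if s == 1 and c <= DAYS_INCUB]
--   idx_recovered = [i for i, s, c in triples if s == 2]
--   idx_dead = [i for i, s, c in triples if s == 3]
--   idx_sick = [i for i, s, c in triples
--               if (s == 1 and c > DAYS_INCUB) or s not in (0, 1, 2, 3)]
--   return idx_healthy, idx_incubation, idx_recovered, idx_dead, idx_sick
-- ===== Notes on version B (the rewrite author's own statement) =====
-- stated objective: alternative
-- what changed: Replaces the single pass with a cascading if/elif and five mutable accumulators by five independent filtered passes (one comprehension per health bucket) over the same zipped view, with the sick bucket's predicate stated positively.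
import Mathlib
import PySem

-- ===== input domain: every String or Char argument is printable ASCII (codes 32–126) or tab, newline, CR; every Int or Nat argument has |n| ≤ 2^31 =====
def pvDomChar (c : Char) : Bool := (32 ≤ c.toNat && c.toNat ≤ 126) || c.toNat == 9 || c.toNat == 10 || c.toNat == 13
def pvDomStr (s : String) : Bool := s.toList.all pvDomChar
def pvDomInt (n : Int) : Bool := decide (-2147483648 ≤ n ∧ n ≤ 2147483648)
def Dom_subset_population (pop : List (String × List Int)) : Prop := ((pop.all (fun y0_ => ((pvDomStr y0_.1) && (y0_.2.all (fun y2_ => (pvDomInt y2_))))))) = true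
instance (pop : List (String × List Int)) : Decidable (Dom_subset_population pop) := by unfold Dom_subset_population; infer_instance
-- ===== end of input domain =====

-- B replaces A's single cascading if/elif pass by five independent filtered passes; return values agree wherever A returns.

-- ===== PORT A =====
-- A's loop body: cascading if/elif appending the index to one of five accumulators.
def spStepA (acc : List Int × List Int × List Int × List Int × List Int)
    (t : Int × Int × Int) : List Int × List Int × List Int × List Int × List Int :=
  let (idx, status, counter) := t
  let (h, i, r, d, s) := acc
  if status = 0 then (h ++ [idx], i, r, d, s)
  else if status = 1 ∧ counter ≤ 3 then (h, i ++ [idx], r, d, s)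
  else if status = 2 then (h, i, r ++ [idx], d, s)
  else if status = 3 then (h, i, r, d ++ [idx], s)
  else (h, i, r, d, s ++ [idx])

def subset_population (pop : List (String × List Int)) : List Int × List Int × List Int × List Int × List Int :=
  match pop.lookup "id", pop.lookup "sick", pop.lookup "sick_counter" with
  | some idl, some sick, some sickc =>
    let ids := PySem.List.pyRange 0 idl.length 1
    let statuses := sick
    let counters := sickc
    (ids.zip (statuses.zip counters)).foldl spStepA ([], [], [], [], [])
  | _, _, _ => ([], [], [], [], [])  -- KeyError in Python: excluded by Pre_

-- ===== PORT B =====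
def spHealthy (t : Int × Int × Int) : Bool := t.2.1 == 0
def spIncub (t : Int × Int × Int) : Bool := t.2.1 == 1 && t.2.2 ≤ 3
def spRecov (t : Int × Int × Int) : Bool := t.2.1 == 2
def spDead (t : Int × Int × Int) : Bool := t.2.1 == 3
def spSick (t : Int × Int × Int) : Bool :=
  (t.2.1 == 1 && 3 < t.2.2) || !(t.2.1 == 0 || t.2.1 == 1 || t.2.1 == 2 || t.2.1 == 3)

def subset_population_alt (pop : List (String × List Int)) : List Int × List Int × List Int × List Int × List Int :=
  match pop.lookup "id" with
  | none => ([], [], [], [], [])  -- KeyError in Python: excluded by Pre_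
  | some idl =>
    match pop.lookup "sick" with
    | none => ([], [], [], [], [])
    | some sick =>
      match pop.lookup "sick_counter" with
      | none => ([], [], [], [], [])
      | some sickc =>
        let triples := (PySem.List.pyRange 0 idl.length 1).zip (sick.zip sickc)
        ((triples.filter spHealthy).map (·.1),
         (triples.filter spIncub).map (·.1),
         (triples.filter spRecov).map (·.1),
         (triples.filter spDead).map (·.1),
         (triples.filter spSick).map (·.1))

-- ===== PRECONDITION & SPEC =====
-- Pre_ excludes only the inputs on which A raises KeyError (a missing 'id', 'sick' or 'sick_counter' key).
def Pre_subset_population (pop : List (String × List Int)) : Prop :=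
  (pop.lookup "id").isSome ∧ (pop.lookup "sick").isSome ∧ (pop.lookup "sick_counter").isSome
instance (pop : List (String × List Int)) : Decidable (Pre_subset_population pop) := by
  unfold Pre_subset_population; infer_instance
def pvWitness_subset_population : (List (String × List Int)) :=
  [("id", [7, 8]), ("sick", [0, 1]), ("sick_counter", [1, 5])]

def Spec_subset_population (pop : List (String × List Int)) (out : List Int × List Int × List Int × List Int × List Int) : Prop := out = subset_population_alt pop
instance (pop : List (String × List Int)) (out : List Int × List Int × List Int × List Int × List Int) : Decidable (Spec_subset_population pop out) := by unfold Spec_subset_population; infer_instance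

-- ===== CLAIM (what is proved, stated in full; the proofs are below) =====
def Claim_equal_subset_population : Prop := ∀ (pop : List (String × List Int)), Dom_subset_population pop → Pre_subset_population pop → Spec_subset_population pop (subset_population pop)

-- ===== LEMMAS AND PROOFS =====
lemma spFold (l : List (Int × Int × Int)) (h i r d s : List Int) :
    l.foldl spStepA (h, i, r, d, s) =
      (h ++ (l.filter spHealthy).map (·.1),
       i ++ (l.filter spIncub).map (·.1),
       r ++ (l.filter spRecov).map (·.1),
       d ++ (l.filter spDead).map (·.1),
       s ++ (l.filter spSick).map (·.1)) := by
  induction l generalizing h i r d s with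
  | nil => simp
  | cons t l ih =>
    obtain ⟨idx, st, c⟩ := t
    simp only [List.foldl_cons, spStepA]
    by_cases h0 : st = 0 <;> by_cases h1 : st = 1 <;> by_cases hc : c ≤ 3 <;>
      by_cases h2 : st = 2 <;> by_cases h3 : st = 3 <;>
      simp_all [ih, spHealthy, spIncub, spRecov, spDead, spSick] <;>
      simp [show ¬ c ≤ 3 from by omega]

-- ===== VERDICT (by name: the statement is the Claim_ definition above) =====
theorem subset_population_spec : Claim_equal_subset_population := by
  intro pop _ hpre
  unfold Spec_subset_population subset_population subset_population_alt
  obtain ⟨h1, h2, h3⟩ := hpre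
  obtain ⟨idl, e1⟩ := Option.isSome_iff_exists.mp h1
  obtain ⟨sk, e2⟩ := Option.isSome_iff_exists.mp h2
  obtain ⟨sc, e3⟩ := Option.isSome_iff_exists.mp h3
  rw [e1, e2, e3]
  simp [spFold]
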